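-- pv_equiv track=rewrite | github.com/iamjarvs/mcp-apstra | primitives/anomaly_clustering.py | build_causal_chain
-- ===== SOURCE A (Python) =====
-- OSI_LAYER: dict[str, int] = {
--     "cabling":    1,  # physical — LLDP neighbour mismatch
--     "interface":  2,  # link — port up/down
--     "lag":        2,  # link aggregation
--     "deployment": 3,  # config deployment state
--     "liveness":   3,  # device reachability
--     "config":     3,  # configuration compliance
--     "bgp":        4,  # routing protocol
--     "route":      4,  # routing table
--     "mac":        5,  # overlay / MAC learning
--     "probe":      6,  # derived telemetry (IBA)
-- }
--
-- OSI_LAYER_LABEL: dict[int, str] = {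
--     1: "L1-physical",
--     2: "L2-link",
--     3: "L3-network",
--     4: "L4-routing",
--     5: "L5-overlay",
--     6: "L6-telemetry",
-- }
--
-- def tag_osi_layer(anomaly: dict) -> dict:
--     """Add ``osi_layer`` and ``osi_label`` keys to an anomaly dict."""
--     layer = OSI_LAYER.get(anomaly.get("anomaly_type", ""), 99)
--     anomaly = dict(anomaly)
--     anomaly["osi_layer"] = layer
--     anomaly["osi_label"] = OSI_LAYER_LABEL.get(layer, "L?-unknown")
--     return anomaly
--
-- def build_causal_chain(anomalies: list[dict]) -> list[str]:
--     """
--     Return an ordered list of OSI layer labels representing the cascade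
--     from lowest to highest layer seen in this cluster.
--
--     Example: ["L1-physical (cabling)", "L4-routing (bgp)"]
--     """
--     tagged = [tag_osi_layer(a) for a in anomalies]
--     # Group by layer, collect types
--     layer_types: dict[int, set[str]] = {}
--     for a in tagged:
--         layer = a["osi_layer"]
--         layer_types.setdefault(layer, set()).add(a["anomaly_type"])
--     chain = []
--     for layer in sorted(layer_types):
--         label = OSI_LAYER_LABEL.get(layer, f"L{layer}-unknown")
--         types_str = ", ".join(sorted(layer_types[layer]))
--         chain.append(f"{label} ({types_str})")
--     return chain
-- ===== SOURCE B (Python) =====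
-- OSI_LAYER: dict[str, int] = {
--     "cabling":    1,
--     "interface":  2,
--     "lag":        2,
--     "deployment": 3,
--     "liveness":   3,
--     "config":     3,
--     "bgp":        4,
--     "route":      4,
--     "mac":        5,
--     "probe":      6,
-- }
--
-- OSI_LAYER_LABEL: dict[int, str] = {
--     1: "L1-physical",
--     2: "L2-link",
--     3: "L3-network",
--     4: "L4-routing",
--     5: "L5-overlay",
--     6: "L6-telemetry",
-- }
--
-- def build_causal_chain(anomalies: list[dict]) -> list[str]:
--     """Ordered OSI-layer cascade labels: one (layer, type) pair per anomaly,
--     then one filtering pass per distinct layer -- no dict-of-sets accumulator.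
--     Like A, raises KeyError when an anomaly lacks 'anomaly_type' (A subscripts
--     a['anomaly_type'] in its grouping loop)."""
--     pairs = [(OSI_LAYER.get(a["anomaly_type"], 99), a["anomaly_type"]) for a in anomalies]
--     chain = []
--     for layer in sorted({l for l, _ in pairs}):
--         types = sorted({t for l, t in pairs if l == layer})
--         label = OSI_LAYER_LABEL.get(layer, f"L{layer}-unknown")
--         chain.append(f"{label} ({', '.join(types)})")
--     return chain
-- ===== Notes on version B (the rewrite author's own statement) =====
-- stated objective: alternative
-- what changed: Replaces the tag-helper plus dict-of-sets accumulator with a single (layer, type) pair list and one filtering pass per distinct layer (no mutable dict/set grouping state).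
-- outside the precondition, e.g. on build_causal_chain([{}]): A raises KeyError, B raises KeyError
import Mathlib
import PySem

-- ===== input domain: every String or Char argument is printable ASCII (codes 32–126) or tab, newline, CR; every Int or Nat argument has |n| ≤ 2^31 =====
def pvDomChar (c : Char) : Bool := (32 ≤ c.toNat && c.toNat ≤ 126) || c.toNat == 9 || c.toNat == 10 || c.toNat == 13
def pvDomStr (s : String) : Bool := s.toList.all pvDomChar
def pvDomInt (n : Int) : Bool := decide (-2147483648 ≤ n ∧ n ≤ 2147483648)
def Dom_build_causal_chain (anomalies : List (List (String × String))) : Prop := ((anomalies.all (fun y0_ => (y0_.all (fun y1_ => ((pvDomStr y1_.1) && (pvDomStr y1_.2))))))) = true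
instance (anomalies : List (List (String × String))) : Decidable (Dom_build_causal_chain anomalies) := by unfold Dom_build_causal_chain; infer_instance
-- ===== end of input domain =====

-- B replaces A's tag-helper + dict-of-sets accumulator by a flat (layer, type) pair
-- list with one filtering pass per distinct layer (objective: alternative decomposition).

-- ===== PORT A =====
def OSI_LAYER : PySem.Dict String Int := PySem.Dict.ofList
  [("cabling", 1), ("interface", 2), ("lag", 2), ("deployment", 3), ("liveness", 3),
   ("config", 3), ("bgp", 4), ("route", 4), ("mac", 5), ("probe", 6)]

def OSI_LAYER_LABEL : PySem.Dict Int String := PySem.Dict.ofList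
  [(1, "L1-physical"), (2, "L2-link"), (3, "L3-network"),
   (4, "L4-routing"), (5, "L5-overlay"), (6, "L6-telemetry")]

-- The tagged anomaly dict is heterogeneous (str and int values); downstream A reads only
-- the original entries, "osi_layer" and "osi_label", so it is carried exactly as the
-- product (original dict, osi_layer, osi_label).
def tag_osi_layer (a : List (String × String)) : List (String × String) × Int × String :=
  let layer := OSI_LAYER.getD ((PySem.Dict.mk a).getD "anomaly_type" "") 99
  (a, layer, OSI_LAYER_LABEL.getD layer "L?-unknown")

def build_causal_chain (anomalies : List (List (String × String))) : List String :=
  let tagged := anomalies.map tag_osi_layer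
  -- the grouping loop; a["anomaly_type"] is get? (none = KeyError, excluded by Pre_)
  let lt? : Option (PySem.Dict Int (PySem.Set String)) :=
    tagged.foldl (fun od p => od.bind (fun d =>
      ((PySem.Dict.mk p.1).get? "anomaly_type").map
        (fun t => d.modify p.2.1 [] (fun s => PySem.Set.add s t))))
      (some PySem.Dict.empty)
  match lt? with
  | none => []   -- KeyError; outside Pre_
  | some lt =>
    (PySem.List.sorted lt.keys (fun x => x) false).map (fun layer =>
      (OSI_LAYER_LABEL.getD layer ("L" ++ PySem.Int.toStr layer ++ "-unknown")) ++
        " (" ++ PySem.Str.join ", " (PySem.List.sorted (lt.getD layer []) (fun x => x) false) ++ ")")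

-- ===== PORT B =====
def build_causal_chain_alt (anomalies : List (List (String × String))) : List String :=
  -- pairs = [(OSI_LAYER.get(a["anomaly_type"], 99), a["anomaly_type"]) for a in anomalies]
  let pairs? : Option (List (Int × String)) :=
    anomalies.foldr (fun a acc => ((PySem.Dict.mk a).get? "anomaly_type").bind (fun t =>
      acc.map (fun r => (OSI_LAYER.getD t 99, t) :: r))) (some [])
  match pairs? with
  | none => []   -- KeyError; outside Pre_
  | some pairs =>
    (PySem.List.sorted (PySem.Set.ofList (pairs.map (·.1))) (fun x => x) false).map (fun layer =>
      let types := PySem.List.sorted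
        (PySem.Set.ofList ((pairs.filter (fun p => p.1 == layer)).map (·.2))) (fun x => x) false
      (OSI_LAYER_LABEL.getD layer ("L" ++ PySem.Int.toStr layer ++ "-unknown")) ++
        " (" ++ PySem.Str.join ", " types ++ ")")

-- ===== PRECONDITION & SPEC =====
-- Pre_ excludes exactly the inputs containing an anomaly dict without the "anomaly_type"
-- key: on those BOTH Pythons raise KeyError — A's helper tag_osi_layer only READS the key
-- via .get (it never adds it to the copy), so A's grouping loop then subscripts the
-- still-keyless tagged dict in `.add(a["anomaly_type"])` and raises KeyError
-- (checked: build_causal_chain([{}]) raises KeyError 'anomaly_type'); B's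
-- a["anomaly_type"] raises the same. A returns no value on any excluded input.
def Pre_build_causal_chain (anomalies : List (List (String × String))) : Prop :=
  ∀ a ∈ anomalies, (PySem.Dict.mk a).contains "anomaly_type" = true
instance (anomalies : List (List (String × String))) : Decidable (Pre_build_causal_chain anomalies) := by unfold Pre_build_causal_chain; infer_instance

def pvWitness_build_causal_chain : (List (List (String × String))) :=
  [[("anomaly_type", "bgp")], [("anomaly_type", "cabling"), ("device", "leaf1")]]

def Spec_build_causal_chain (anomalies : List (List (String × String))) (out : List String) : Prop := out = build_causal_chain_alt anomalies
instance (anomalies : List (List (String × String))) (out : List String) : Decidable (Spec_build_causal_chain anomalies out) := by unfold Spec_build_causal_chain; infer_instance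

-- ===== CLAIM (what is proved, stated in full; the proofs are below) =====
def Claim_equal_build_causal_chain : Prop := ∀ (anomalies : List (List (String × String))), Dom_build_causal_chain anomalies → Pre_build_causal_chain anomalies → Spec_build_causal_chain anomalies (build_causal_chain anomalies)

-- ===== LEMMAS AND PROOFS =====

def layerOf (a : List (String × String)) : Int :=
  OSI_LAYER.getD ((PySem.Dict.mk a).getD "anomaly_type" "") 99
def typeOf (a : List (String × String)) : String :=
  (PySem.Dict.mk a).getD "anomaly_type" ""

-- A's Option-threaded grouping fold, under Pre_, is the total modify fold.
lemma a_fold_total (l : List (List (String × String)))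
    (h : ∀ a ∈ l, (PySem.Dict.mk a).contains "anomaly_type" = true)
    (d : PySem.Dict Int (PySem.Set String)) :
    (l.map tag_osi_layer).foldl (fun od p => od.bind (fun d =>
      ((PySem.Dict.mk p.1).get? "anomaly_type").map
        (fun t => d.modify p.2.1 [] (fun s => PySem.Set.add s t)))) (some d)
    = some (l.foldl (fun d a => d.modify (layerOf a) [] (fun s => PySem.Set.add s (typeOf a))) d) := by
  induction l generalizing d with
  | nil => rfl
  | cons a l ih =>
    have ha := h a (List.mem_cons_self ..)
    obtain ⟨t, ht⟩ := Option.isSome_iff_exists.mp (by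
      rw [PySem.Dict.contains_eq_isSome_get?] at ha; exact ha)
    have htd : typeOf a = t := by
      simp [typeOf, PySem.Dict.getD_eq_get?_getD, ht]
    simp only [List.map_cons, List.foldl_cons, Option.bind_some, ht, Option.map_some,
      tag_osi_layer]
    rw [ih (fun x hx => h x (List.mem_cons_of_mem _ hx))]
    simp [layerOf, htd]

-- Value of the total grouping fold at any layer key.
lemma a_fold_getD (l : List (List (String × String)))
    (d : PySem.Dict Int (PySem.Set String)) (L : Int) :
    (l.foldl (fun d a => d.modify (layerOf a) [] (fun s => PySem.Set.add s (typeOf a))) d).getD L []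
    = PySem.Set.update (d.getD L []) ((l.filter (fun a => layerOf a == L)).map typeOf) := by
  induction l generalizing d with
  | nil => simp [PySem.Set.update]
  | cons a l ih =>
    simp only [List.foldl_cons, List.filter_cons]
    rw [ih, PySem.Dict.getD_modify]
    by_cases hL : L = layerOf a
    · subst hL
      simp [PySem.Set.update_cons]
    · rw [if_neg hL]
      have hb : (layerOf a == L) = false := by simp; omega
      simp [hb]

-- B's Option-threaded pair-building fold, under Pre_, is the total pair list.
lemma b_fold_total (l : List (List (String × String)))
    (h : ∀ a ∈ l, (PySem.Dict.mk a).contains "anomaly_type" = true) :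
    l.foldr (fun a acc => ((PySem.Dict.mk a).get? "anomaly_type").bind (fun t =>
      acc.map (fun r => (OSI_LAYER.getD t 99, t) :: r))) (some [])
    = some (l.map (fun a => (layerOf a, typeOf a))) := by
  induction l with
  | nil => rfl
  | cons a l ih =>
    have ha := h a (List.mem_cons_self ..)
    obtain ⟨t, ht⟩ := Option.isSome_iff_exists.mp (by
      rw [PySem.Dict.contains_eq_isSome_get?] at ha; exact ha)
    have htd : typeOf a = t := by
      simp [typeOf, PySem.Dict.getD_eq_get?_getD, ht]
    simp only [List.foldr_cons, ht, Option.bind_some]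
    rw [ih (fun x hx => h x (List.mem_cons_of_mem _ hx))]
    simp only [typeOf] at htd
    simp [layerOf, typeOf, htd]

-- ===== VERDICT (by name: the statement is the Claim_ definition above) =====
theorem build_causal_chain_spec : Claim_equal_build_causal_chain := by
  intro anomalies _ hpre
  unfold Spec_build_causal_chain build_causal_chain build_causal_chain_alt
  simp only [a_fold_total anomalies hpre PySem.Dict.empty, b_fold_total anomalies hpre]
  have hkeys : (anomalies.foldl (fun d a => d.modify (layerOf a) [] (fun s => PySem.Set.add s (typeOf a))) PySem.Dict.empty).keys
      = PySem.Set.ofList ((anomalies.map (fun a => (layerOf a, typeOf a))).map (·.1)) := by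
    rw [PySem.Dict.keys_foldl_modify_key]
    simp [PySem.Dict.keys_empty, List.map_map, PySem.Set.ofList_eq_foldl, PySem.Set.update, Function.comp_def]
  rw [hkeys]
  apply List.map_congr_left
  intro L hL
  have hval : (anomalies.foldl (fun d a => d.modify (layerOf a) [] (fun s => PySem.Set.add s (typeOf a))) PySem.Dict.empty).getD L []
      = PySem.Set.ofList (((anomalies.map (fun a => (layerOf a, typeOf a))).filter (fun p => p.1 == L)).map (·.2)) := by
    rw [a_fold_getD]
    simp [PySem.Dict.getD_empty, List.filter_map, List.map_map, PySem.Set.ofList_eq_foldl, PySem.Set.update, Function.comp_def]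
  rw [hval]
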